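-- pv_equiv track=rewrite | github.com/ASHISH-KUMAR-PANDEY/python | give_me_a_hint.py | grant_the_hint
-- ===== SOURCE A (Python) =====
-- def grant_the_hint(txt):
--     txt = txt.split(' ')
--     ans = []
--     m = max(len(i) for i in txt)
--     for i in txt:
--         l = len(i)
--         row = ['_'*l]
--         ind = 1
--         for j in range(len(i)):
--             el = i[:ind] + ('_'*(l-ind))
--             row.append(el)
--             ind+=1
--         for j in range(m-l):
--             row.append(i)
--         ans.append(row)
--     a = []
--     for i in range(len(ans[0])):
--         bl = []
--         for j in range(len(ans)):
--             bl.append(ans[j][i])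
--         a.append(" ".join(bl))
--     return a
-- ===== SOURCE B (Python) =====
-- def grant_the_hint(txt):
--     words = txt.split(' ')
--     m = max(len(w) for w in words)
--     return [" ".join(w[:k] + '_' * (len(w) - k) for w in words) for k in range(m + 1)]
-- ===== Notes on version B (the rewrite author's own statement) =====
-- stated objective: simpler
-- what changed: B never builds the per-word grid or transposes it: each output line k is produced directly by the closed formula w[:k] + '_'*(len(w)-k) over all words (negative repeat yielding '' when k exceeds a word's length), replacing A's row construction plus index-based transpose.
import Mathlib
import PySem

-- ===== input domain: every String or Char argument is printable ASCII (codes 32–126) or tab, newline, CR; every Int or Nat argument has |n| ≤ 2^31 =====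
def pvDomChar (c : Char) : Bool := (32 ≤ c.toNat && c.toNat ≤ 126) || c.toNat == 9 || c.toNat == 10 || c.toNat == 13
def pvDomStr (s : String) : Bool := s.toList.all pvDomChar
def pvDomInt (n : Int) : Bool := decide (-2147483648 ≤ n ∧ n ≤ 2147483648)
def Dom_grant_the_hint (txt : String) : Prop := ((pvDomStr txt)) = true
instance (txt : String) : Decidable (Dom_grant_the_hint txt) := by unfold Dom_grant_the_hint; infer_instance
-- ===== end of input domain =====

-- B drops A's per-word grid and transpose: each output line k is the closed formula
-- w[:k] + '_'*(len(w)-k) joined over the words (objective: simpler).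

-- ===== PORT A =====
-- A-side helpers: the two loops of A, step for step
-- A's per-word row computation (definitionally the body of the map in port A)
def pvRowA (m : Nat) (i : List Char) : List (List Char) :=
  (PySem.List.pyRange 0 ((m : Int) - (i.length : Int))).foldl (fun r _ => r ++ [i])
    ((PySem.List.pyRange 0 (i.length : Int)).foldl
      (fun (st : List (List Char) × Nat) _ =>
        (st.1 ++ [PySem.List.slice i none (some (st.2 : Int)) ++
                  PySem.List.pyRepeat ['_'] ((i.length : Int) - (st.2 : Int))], st.2 + 1))
      ([PySem.List.pyRepeat ['_'] (i.length : Int)], 1)).1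

-- A's transpose-and-join phase (definitionally the tail of port A)
def pvTranspose (ans : List (List (List Char))) : List String :=
  (PySem.List.pyRange 0 (((PySem.List.pyGet? ans 0).getD []).length : Int)).foldl
    (fun (a : List String) i =>
      let bl := (PySem.List.pyRange 0 (ans.length : Int)).foldl
        (fun (bl : List (List Char)) j =>
          bl ++ [(PySem.List.pyGet? ((PySem.List.pyGet? ans j).getD []) i).getD []]) []
      a ++ [String.ofList (PySem.Chars.join [' '] bl)]) []

def grant_the_hint (txt : String) : List String :=
  let words := PySem.Chars.splitOn txt.toList [' ']        -- txt = txt.split(' ')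
  -- m = max(len(i) for i in txt); '.getD 0' is unreachable: split always returns a nonempty list
  let m := (PySem.List.max? (words.map (fun i => i.length)) (fun x => x)).getD 0
  let ans := words.map (fun i => pvRowA m i)               -- per-word row loop (pvRowA)
  pvTranspose ans                                          -- transpose + " ".join loop (pvTranspose)

-- ===== PORT B =====
def grant_the_hint_alt (txt : String) : List String :=
  let words := PySem.Chars.splitOn txt.toList [' ']        -- words = txt.split(' ')
  -- m = max(len(w) for w in words); '.getD 0' is unreachable: split always returns a nonempty list
  let m : Nat := (PySem.List.max? (words.map (fun w => w.length)) (fun x => x)).getD 0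
  (PySem.List.pyRange 0 ((m : Int) + 1)).map (fun k =>     -- for k in range(m+1)
    String.ofList (PySem.Chars.join [' ']
      (words.map (fun w =>
        PySem.List.slice w none (some k) ++
        PySem.List.pyRepeat ['_'] ((w.length : Int) - k))))) -- w[:k] + '_'*(len(w)-k)

-- ===== PRECONDITION & SPEC =====
def Spec_grant_the_hint (txt : String) (out : List String) : Prop := out = grant_the_hint_alt txt
instance (txt : String) (out : List String) : Decidable (Spec_grant_the_hint txt out) := by unfold Spec_grant_the_hint; infer_instance

-- ===== CLAIM (what is proved, stated in full; the proofs are below) =====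
def Claim_equal_grant_the_hint : Prop := ∀ (txt : String), Dom_grant_the_hint txt → Spec_grant_the_hint txt (grant_the_hint txt)

-- ===== LEMMAS AND PROOFS =====

-- the k-th hint for a word: its first k characters, the rest masked with '_'
def pvHint (w : List Char) (k : Nat) : List Char := w.take k ++ List.replicate (w.length - k) '_'

lemma splitOn_go_ne_nil (sep : List Char) : ∀ (fuel : Nat) (l cur : List Char) (acc : List (List Char)),
    PySem.Chars.splitOn.go sep fuel l cur acc ≠ [] := by
  intro fuel
  induction fuel with
  | zero => intro l cur acc; simp [PySem.Chars.splitOn.go]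
  | succ n ih =>
    intro l cur acc
    cases l with
    | nil => simp [PySem.Chars.splitOn.go]
    | cons c rest =>
      rw [PySem.Chars.splitOn.go]
      split <;> apply ih

lemma splitOn_ne_nil (s sep : List Char) : PySem.Chars.splitOn s sep ≠ [] := by
  unfold PySem.Chars.splitOn; apply splitOn_go_ne_nil

-- positive-index variant of pyGetD_natCast, in the shape the ports use
lemma pyGet?_getD_natCast {α : Type} (xs : List α) (n : Nat) (d : α) :
    (PySem.List.pyGet? xs (n : Int)).getD d = xs.getD n d :=
  PySem.List.pyGetD_natCast xs n d

-- A's inner `for j in range(len(i))` loop, with its (row, ind) state, as a map over range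
lemma foldRow (i : List Char) (l : Nat) (n : Nat) : ∀ (acc : List (List Char)) (s : Nat),
    (List.range n).foldl
      (fun (st : List (List Char) × Nat) _ =>
        (st.1 ++ [PySem.List.slice i none (some (st.2 : Int)) ++
                  PySem.List.pyRepeat ['_'] ((l : Int) - (st.2 : Int))], st.2 + 1)) (acc, s)
    = (acc ++ (List.range n).map (fun j => i.take (s + j) ++ List.replicate (l - (s + j)) '_'), s + n) := by
  induction n with
  | zero => intro acc s; simp
  | succ n ih =>
    intro acc s
    rw [List.range_succ, List.foldl_append, ih]
    simp [PySem.List.slice_to_natCast, PySem.List.pyRepeat_singleton]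
    omega

-- reading every element of a list through getD over range(len) is just map
lemma map_range_getD {α β : Type} (xs : List α) (d : α) (f : α → β) :
    (List.range xs.length).map (fun j => f (xs.getD j d)) = xs.map f := by
  apply List.ext_getElem
  · simp
  · intro i h1 h2
    have hi : i < xs.length := by simpa using h1
    simp [List.getD_eq_getElem?_getD, List.getElem?_eq_getElem hi]

-- A's full per-word row equals the column formula pvHint mapped over range (m+1)
lemma rowA_eq (i : List Char) (m : Nat) (h : i.length ≤ m) :
    pvRowA m i = (List.range (m + 1)).map (pvHint i) := by
  unfold pvRowA
  rw [PySem.List.pyRange_zero_natCast, List.foldl_map, foldRow]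
  rw [show ((m : Int) - (i.length : Int)) = ((m - i.length : Nat) : Int) by omega,
    PySem.List.pyRange_zero_natCast, List.foldl_map,
    PySem.List.foldl_append_singleton_eq_map (fun _ => i)]
  rw [List.range_succ_eq_map]
  have hm : m = i.length + (m - i.length) := by omega
  rw [List.map_cons]
  conv_rhs => rw [hm, List.range_add, List.map_append]
  simp only [PySem.List.pyRepeat_singleton, List.map_map, List.cons_append,
    List.nil_append, List.map_append, Int.toNat_natCast]
  rw [show List.replicate i.length '_' = pvHint i 0 by simp [pvHint]]
  congr 1
  congr 1
  · apply List.map_congr_left; intro j hj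
    simp [pvHint, Function.comp, Nat.add_comm 1 j]
  · apply List.map_congr_left; intro j hj
    simp only [Function.comp]
    have hle : i.length ≤ i.length + j + 1 := by omega
    simp [pvHint, List.take_of_length_le hle, Nat.sub_eq_zero_of_le hle]

-- B's body in the same normal form
lemma altNorm (words : List (List Char)) (m : Nat) :
    (PySem.List.pyRange 0 ((m : Int) + 1)).map (fun k =>
      String.ofList (PySem.Chars.join [' ']
        (words.map (fun w =>
          PySem.List.slice w none (some k) ++
          PySem.List.pyRepeat ['_'] ((w.length : Int) - k)))))
    = (List.range (m + 1)).map (fun k =>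
        String.ofList (PySem.Chars.join [' '] (words.map (fun w => pvHint w k)))) := by
  rw [show ((m : Int) + 1) = ((m + 1 : Nat) : Int) by push_cast; ring,
    PySem.List.pyRange_zero_natCast, List.map_map]
  apply List.map_congr_left; intro k hk
  simp [Function.comp, PySem.List.slice_to_natCast, PySem.List.pyRepeat_singleton, pvHint]

-- A's grid build + transpose, on a nonempty word list whose lengths are bounded by m,
-- equals the column formula
lemma core (x : List Char) (t : List (List Char)) (m : Nat)
    (hlen : ∀ w ∈ x :: t, w.length ≤ m) :
    pvTranspose ((x :: t).map (pvRowA m))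
    = (List.range (m + 1)).map (fun k =>
        String.ofList (PySem.Chars.join [' '] ((x :: t).map (fun w => pvHint w k)))) := by
  unfold pvTranspose
  rw [show (x :: t).map (pvRowA m) = (x :: t).map (fun w => (List.range (m + 1)).map (pvHint w)) from
    List.map_congr_left (fun w hw => rowA_eq w m (hlen w hw))]
  simp only [List.map_cons, PySem.List.pyGet?_zero_cons, Option.getD_some,
    List.length_map, List.length_range, List.length_cons]
  rw [PySem.List.foldl_append_singleton_eq_map, PySem.List.pyRange_zero_natCast (t.length + 1),
    PySem.List.pyRange_zero_natCast (m + 1), List.map_map, List.nil_append]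
  apply List.map_congr_left; intro k hk
  have hkm : k < m + 1 := List.mem_range.mp hk
  simp only [Function.comp]
  rw [List.foldl_map, PySem.List.foldl_append_singleton_eq_map, List.nil_append]
  congr 1
  have hfun : (fun j : Nat =>
        (PySem.List.pyGet? ((PySem.List.pyGet?
            ((List.range (m+1)).map (pvHint x) :: t.map (fun w => (List.range (m+1)).map (pvHint w)))
            ((j : Nat) : Int)).getD []) ((k : Nat) : Int)).getD ([] : List Char))
      = fun j : Nat => (fun row : List (List Char) => row.getD k [])
          (((List.range (m+1)).map (pvHint x) :: t.map (fun w => (List.range (m+1)).map (pvHint w))).getD j []) :=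
    funext fun j => by simp only [pyGet?_getD_natCast]
  rw [hfun,
    show t.length + 1 = ((List.range (m+1)).map (pvHint x) :: t.map (fun w => (List.range (m+1)).map (pvHint w))).length by simp,
    map_range_getD ((List.range (m+1)).map (pvHint x) :: t.map (fun w => (List.range (m+1)).map (pvHint w))) []
      (fun row : List (List Char) => row.getD k [])]
  rw [List.map_cons, List.map_map]
  congr 1
  simp [List.getD_eq_getElem?_getD, hkm]

-- ===== VERDICT (by name: the statement is the Claim_ definition above) =====
set_option maxHeartbeats 1000000 in
theorem grant_the_hint_spec : Claim_equal_grant_the_hint := by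
  intro txt _
  show grant_the_hint txt = grant_the_hint_alt txt
  obtain ⟨x, t, hxt⟩ := List.exists_cons_of_ne_nil (splitOn_ne_nil txt.toList [' '])
  unfold grant_the_hint grant_the_hint_alt
  rw [hxt]
  have hm : (PySem.List.max? ((x :: t).map (fun i => i.length)) (fun x => x)).getD 0
      = (t.map (fun i => i.length)).foldl max x.length := by
    rw [List.map_cons, PySem.List.max?_id_cons, Option.getD_some]
  have hlen : ∀ w ∈ x :: t, w.length ≤ (PySem.List.max? ((x :: t).map (fun i => i.length)) (fun x => x)).getD 0 := by
    intro w hw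
    rw [hm]
    rcases hw with _ | hw
    · exact (PySem.List.le_foldl_max (t.map (fun i => i.length)) x.length).1
    · exact (PySem.List.le_foldl_max (t.map (fun i => i.length)) x.length).2 _
        (List.mem_map_of_mem ‹_›)
  refine Eq.trans (b := (List.range (((PySem.List.max? ((x :: t).map (fun i => i.length)) (fun x => x)).getD 0) + 1)).map (fun k =>
        String.ofList (PySem.Chars.join [' '] ((x :: t).map (fun w => pvHint w k))))) ?_ ?_
  · exact core x t _ hlen
  · exact (altNorm (x :: t) ((PySem.List.max? ((x :: t).map (fun i => i.length)) (fun x => x)).getD 0)).symm
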